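-- pv_equiv track=rewrite | github.com/manwar/perlweeklychallenge-club | challenge-293/lubos-kolouch/python/ch-1.py | count_similar_dominos
-- ===== SOURCE A (Python) =====
-- def count_similar_dominos(dominos):
--     domino_counts = {}
--     count = 0
--
--     # Normalize dominos and count occurrences
--     for domino in dominos:
--         a, b = domino
--         key = tuple(sorted((a, b)))
--         domino_counts[key] = domino_counts.get(key, 0) + 1
--
--     # Identify dominos that are similar to any other
--     for domino in dominos:
--         a, b = domino
--         key = tuple(sorted((a, b)))
--         if domino_counts[key] > 1:
--             count += 1
--
--     return count
-- ===== SOURCE B (Python) =====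
-- def count_similar_dominos(dominos):
--     # Sort the normalized dominoes, then scan runs of equal keys: a run of
--     # length > 1 contributes all its members. No dictionary at all.
--     keys = sorted((a, b) if a <= b else (b, a) for a, b in dominos)
--     total = 0
--     while keys:
--         k = keys[0]
--         run = 1
--         while run < len(keys) and keys[run] == k:
--             run += 1
--         if run > 1:
--             total += run
--         keys = keys[run:]
--     return total
-- ===== Notes on version B (the rewrite author's own statement) =====
-- stated objective: alternative
-- what changed: B replaces A's hash-table tally plus second scan of the input with sort-then-run-scan: it sorts the normalized dominoes and sums the lengths of runs of equal keys longer than 1, using no dictionary.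
import Mathlib
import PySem

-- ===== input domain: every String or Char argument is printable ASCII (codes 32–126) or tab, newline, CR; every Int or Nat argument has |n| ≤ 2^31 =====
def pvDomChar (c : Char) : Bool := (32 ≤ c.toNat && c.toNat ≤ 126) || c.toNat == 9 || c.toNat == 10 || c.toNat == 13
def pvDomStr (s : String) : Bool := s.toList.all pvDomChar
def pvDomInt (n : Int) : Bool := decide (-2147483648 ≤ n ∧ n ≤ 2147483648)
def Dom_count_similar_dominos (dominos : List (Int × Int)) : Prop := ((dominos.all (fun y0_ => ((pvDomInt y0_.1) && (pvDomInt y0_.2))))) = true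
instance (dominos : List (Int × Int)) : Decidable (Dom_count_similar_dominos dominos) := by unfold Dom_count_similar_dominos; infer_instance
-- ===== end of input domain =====

-- B sorts the normalized dominoes and sums runs of equal keys of length > 1
-- (sort-then-run-scan, no dictionary) instead of A's dict tally plus second
-- scan of the input list; objective: alternative algorithm, similar cost.


-- ===== PORT A =====
-- key = tuple(sorted((a, b))): the sorted pair, written out on the two components
def pvNormA (p : Int × Int) : Int × Int := if p.1 ≤ p.2 then (p.1, p.2) else (p.2, p.1)

-- domino_counts[key] in the second loop never raises (the key was inserted in the
-- first loop over the same list), so getD … 0 is exact there.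
def count_similar_dominos (dominos : List (Int × Int)) : Int :=
  let domino_counts : PySem.Dict (Int × Int) Int :=
    dominos.foldl (fun d domino =>
      d.insert (pvNormA domino) (d.getD (pvNormA domino) 0 + 1)) PySem.Dict.empty
  dominos.foldl (fun count domino =>
    if domino_counts.getD (pvNormA domino) 0 > 1 then count + 1 else count) 0

-- ===== PORT B =====
def pvNormB (p : Int × Int) : Int × Int := if p.1 ≤ p.2 then (p.1, p.2) else (p.2, p.1)

-- the outer while loop of Source B: take the leading run of keys equal to keys[0]
-- (the inner while advances run over equal neighbours), add its length when > 1,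
-- and continue on keys[run:]
def pvRunScan : List (Int × Int) → Int
  | [] => 0
  | k :: rest =>
    let run : Int := 1 + ((rest.takeWhile (fun x => x == k)).length : Int)
    (if run > 1 then run else 0) + pvRunScan (rest.dropWhile (fun x => x == k))
termination_by l => l.length
decreasing_by
  simp only [List.length_cons]
  exact Nat.lt_succ_of_le (List.length_dropWhile_le _ _)

def count_similar_dominos_alt (dominos : List (Int × Int)) : Int :=
  let keys := PySem.List.sorted2
    (dominos.map pvNormB) (fun p => p.1) (fun p => p.2)
  pvRunScan keys

-- ===== PRECONDITION & SPEC =====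
def Spec_count_similar_dominos (dominos : List (Int × Int)) (out : Int) : Prop := out = count_similar_dominos_alt dominos
instance (dominos : List (Int × Int)) (out : Int) : Decidable (Spec_count_similar_dominos dominos out) := by unfold Spec_count_similar_dominos; infer_instance

-- ===== CLAIM (what is proved, stated in full; the proofs are below) =====
def Claim_equal_count_similar_dominos : Prop := ∀ (dominos : List (Int × Int)), Dom_count_similar_dominos dominos → Spec_count_similar_dominos dominos (count_similar_dominos dominos)

-- ===== LEMMAS AND PROOFS =====

-- the Python tuple order on normalized keys: lexicographic ≤ on Int × Int
def pvR (a b : Int × Int) : Prop := a.1 < b.1 ∨ (a.1 = b.1 ∧ a.2 ≤ b.2)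

-- the comparison sorted2 uses, as a Bool
def pvLt (a b : Int × Int) : Bool :=
  decide (a.1 < b.1) || (!decide (b.1 < a.1) && decide (a.2 < b.2))

theorem pvR_of_pvLt {a b : Int × Int} (h : pvLt a b = true) : pvR a b := by
  unfold pvLt at h
  simp only [Bool.or_eq_true, Bool.and_eq_true, Bool.not_eq_true', decide_eq_true_eq,
    decide_eq_false_iff_not] at h
  unfold pvR; omega

theorem pvR_of_not_pvLt {a b : Int × Int} (h : pvLt a b = false) : pvR b a := by
  have h' : ¬ (pvLt a b = true) := by simp [h]
  unfold pvLt at h'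
  simp only [Bool.or_eq_true, Bool.and_eq_true, Bool.not_eq_true', decide_eq_true_eq,
    decide_eq_false_iff_not] at h'
  unfold pvR; omega

theorem pvR_trans {a b c : Int × Int} (h1 : pvR a b) (h2 : pvR b c) : pvR a c := by
  unfold pvR at *; omega

theorem pvR_antisymm {a b : Int × Int} (h1 : pvR a b) (h2 : pvR b a) : a = b := by
  unfold pvR at *
  have : a.1 = b.1 ∧ a.2 = b.2 := by omega
  exact Prod.ext this.1 this.2

-- inserting into a pvR-sorted list keeps it pvR-sorted
theorem pv_insertBy_pairwise (x : Int × Int) :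
    ∀ (ys : List (Int × Int)), ys.Pairwise pvR →
      (PySem.List.insertBy pvLt x ys).Pairwise pvR := by
  intro ys
  induction ys with
  | nil => intro _; simp [PySem.List.insertBy]
  | cons y ys ih =>
    intro h
    rw [List.pairwise_cons] at h
    show (if pvLt x y then x :: y :: ys else y :: PySem.List.insertBy pvLt x ys).Pairwise pvR
    by_cases hxy : pvLt x y = true
    · rw [if_pos hxy]
      refine List.pairwise_cons.mpr ⟨?_, List.pairwise_cons.mpr h⟩
      intro z hz
      rcases List.mem_cons.mp hz with rfl | hz'
      · exact pvR_of_pvLt hxy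
      · exact pvR_trans (pvR_of_pvLt hxy) (h.1 z hz')
    · rw [if_neg hxy]
      refine List.pairwise_cons.mpr ⟨?_, ih h.2⟩
      intro z hz
      rcases (PySem.List.mem_insertBy pvLt x z ys).mp hz with rfl | hz'
      · exact pvR_of_not_pvLt (Bool.not_eq_true _ ▸ hxy)
      · exact h.1 z hz'

theorem pv_sorted2_pairwise (xs : List (Int × Int)) :
    (PySem.List.sorted2 xs (fun p => p.1) (fun p => p.2)).Pairwise pvR := by
  have main : ∀ (l acc : List (Int × Int)), acc.Pairwise pvR →
      (l.foldl (fun acc x => PySem.List.insertBy pvLt x acc) acc).Pairwise pvR := by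
    intro l
    induction l with
    | nil => intro acc h; exact h
    | cons x l ih => intro acc h; exact ih _ (pv_insertBy_pairwise x acc h)
  have hdef : PySem.List.sorted2 xs (fun p => p.1) (fun p => p.2)
      = xs.foldl (fun acc x => PySem.List.insertBy pvLt x acc) [] := rfl
  rw [hdef]
  exact main xs [] List.Pairwise.nil

-- countP of "occurs more than once", a count that only depends on the multiset
def pvMulti (l : List (Int × Int)) : Nat :=
  l.countP (fun x => decide (1 < l.count x))

theorem pvMulti_perm {l l' : List (Int × Int)} (hp : l.Perm l') :
    pvMulti l = pvMulti l' := by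
  unfold pvMulti
  exact hp.countP_congr (fun x _ => by rw [hp.count_eq])

-- constant-predicate countP over a run of equal elements
theorem pv_countP_const {t : List (Int × Int)} {k : Int × Int} {p : Int × Int → Bool}
    (hall : ∀ x ∈ t, x = k) : t.countP p = if p k then t.length else 0 := by
  induction t with
  | nil => simp
  | cons x t ih =>
    have hx : x = k := hall x List.mem_cons_self
    have ht : ∀ y ∈ t, y = k := fun y hy => hall y (List.mem_cons_of_mem x hy)
    rw [List.countP_cons, ih ht, hx]
    by_cases h : p k = true <;> simp [h]

-- the run scan of a pvR-sorted list counts exactly the elements occurring > once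
theorem pv_runScan_eq : ∀ (n : Nat) (l : List (Int × Int)), l.length ≤ n →
    l.Pairwise pvR → pvRunScan l = (pvMulti l : Int) := by
  intro n
  induction n with
  | zero =>
    intro l hlen _
    have : l = [] := List.eq_nil_of_length_eq_zero (Nat.le_zero.mp hlen)
    subst this; simp [pvRunScan, pvMulti]
  | succ n ih =>
    intro l hlen hpw
    cases l with
    | nil => simp [pvRunScan, pvMulti]
    | cons k rest =>
      rw [List.pairwise_cons] at hpw
      obtain ⟨hk, hrest⟩ := hpw
      set t := rest.takeWhile (fun x => x == k) with ht
      set d := rest.dropWhile (fun x => x == k) with hd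
      have hsplit : t ++ d = rest := List.takeWhile_append_dropWhile
      -- every element of the taken run equals k
      have htk : ∀ x ∈ t, x = k := fun x hx =>
        eq_of_beq (List.mem_takeWhile_imp (p := fun x => x == k) (l := rest) (ht ▸ hx))
      -- k does not occur after the run
      have hkd : k ∉ d := by
        intro hkin
        cases hdc : d with
        | nil => rw [hdc] at hkin; exact absurd hkin List.not_mem_nil
        | cons h0 d' =>
          have hdd : rest.dropWhile (fun x => x == k) = h0 :: d' := by
            rw [← hd]; exact hdc
          have hw : rest.dropWhile (fun x => x == k) ≠ [] := by simp [hdd]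
          have hh0 := List.head_dropWhile_not (fun x => x == k) hw
          have hb : (rest.dropWhile (fun x => x == k)).head hw = h0 := by simp [hdd]
          rw [hb] at hh0
          have hh0k : h0 ≠ k := by simpa using hh0
          have hpd : d.Pairwise pvR := hrest.sublist (List.dropWhile_sublist _)
          rw [hdc] at hkin
          rcases List.mem_cons.mp hkin with rfl | hk'
          · exact hh0k rfl
          · have h1 : pvR h0 k := by
              rw [hdc] at hpd
              exact (List.pairwise_cons.mp hpd).1 k hk'
            have h2 : pvR k h0 := hk h0 (by
              rw [← hsplit, hdc]; exact List.mem_append_right _ List.mem_cons_self)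
            exact hh0k (pvR_antisymm h1 h2)
      have hckt : t.count k = t.length :=
        List.count_eq_length.mpr (fun b hb => ((htk b hb).symm ▸ rfl))
      have hckd : d.count k = 0 := List.count_eq_zero.mpr hkd
      -- total count of k in the whole list is the run length
      have hck : (k :: rest).count k = 1 + t.length := by
        rw [← hsplit, List.count_cons_self, List.count_append, hckt, hckd]
        omega
      -- counts of later elements are unaffected by the head run
      have hcd : ∀ x ∈ d, (k :: rest).count x = d.count x := by
        intro x hx
        have hxk : x ≠ k := fun h => hkd (h ▸ hx)
        have hxt : t.count x = 0 := List.count_eq_zero.mpr (fun hxx => hxk (htk x hxx))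
        rw [← hsplit, List.count_cons_of_ne (Ne.symm hxk), List.count_append, hxt]
        omega
      -- split the countP along head, run, remainder
      have hcount : pvMulti (k :: rest)
          = (if 0 < t.length then 1 + t.length else 0) + pvMulti d := by
        unfold pvMulti
        set p : (Int × Int) → Bool := fun x => decide (1 < (k :: rest).count x) with hp
        have hpk : p k = decide (0 < t.length) := by
          show decide (1 < (k :: rest).count k) = decide (0 < t.length)
          rw [hck, decide_eq_decide]
          omega
        have hpt : t.countP p = if 0 < t.length then t.length else 0 := by
          rw [pv_countP_const htk, hpk]
          by_cases h0 : 0 < t.length <;> simp [h0]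
        have hpd : d.countP p = d.countP (fun x => decide (1 < d.count x)) := by
          refine List.countP_congr (fun x hx => ?_)
          show decide (1 < (k :: rest).count x) = true ↔ decide (1 < d.count x) = true
          rw [hcd x hx]
        rw [← hsplit, List.countP_cons, List.countP_append, hpt, hpd, hpk]
        by_cases h0 : 0 < t.length
        · simp [h0]
          omega
        · simp [h0]
      -- unfold one step of the scan and apply the induction hypothesis on d
      have hstep : pvRunScan (k :: rest)
          = (if (1 + (t.length : Int)) > 1 then 1 + (t.length : Int) else 0)
            + pvRunScan d := by
        rw [pvRunScan]
      have hdlen : d.length ≤ n := by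
        have h1 : d.length ≤ rest.length := List.length_dropWhile_le _ _
        have h2 : rest.length + 1 ≤ n + 1 := by simpa [List.length_cons] using hlen
        omega
      have hpwd : d.Pairwise pvR := hrest.sublist (List.dropWhile_sublist _)
      rw [hstep, ih d hdlen hpwd, hcount]
      by_cases h0 : 0 < t.length
      · rw [if_pos h0, if_pos (by omega : (1 : Int) + (t.length : Int) > 1)]
        push_cast; ring
      · rw [if_neg h0, if_neg (by omega : ¬ ((1 : Int) + (t.length : Int) > 1))]
        simp

-- A's two scans compute: how many dominoes have a key occurring more than once
theorem count_similar_dominos_eq_countP (dominos : List (Int × Int)) :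
    count_similar_dominos dominos = (pvMulti (dominos.map pvNormA) : Int) := by
  unfold count_similar_dominos
  have hd : dominos.foldl (fun d domino =>
      d.insert (pvNormA domino) (d.getD (pvNormA domino) 0 + 1)) PySem.Dict.empty
      = PySem.Dict.counter (dominos.map pvNormA) := by
    rw [← PySem.Dict.foldl_insert_getD_add_one_eq_counter, List.foldl_map]
  simp only [hd]
  calc dominos.foldl (fun count domino =>
        if (PySem.Dict.counter (dominos.map pvNormA)).getD (pvNormA domino) 0 > 1
        then count + 1 else count) (0 : Int)
      = (dominos.map pvNormA).foldl (fun count k =>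
        if (PySem.Dict.counter (dominos.map pvNormA)).getD k 0 > 1
        then count + 1 else count) (0 : Int) := by rw [List.foldl_map]
    _ = _ := by
        rw [PySem.List.foldl_ite_add_one]
        unfold pvMulti
        simp only [PySem.Dict.getD_counter, zero_add]
        congr 1
        refine List.countP_congr (fun x _ => ?_)
        simp only [decide_eq_true_eq, gt_iff_lt]
        norm_cast

-- ===== VERDICT (by name: the statement is the Claim_ definition above) =====
theorem count_similar_dominos_spec : Claim_equal_count_similar_dominos := by
  intro dominos _
  show count_similar_dominos dominos = count_similar_dominos_alt dominos
  unfold count_similar_dominos_alt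
  have hnn : pvNormB = pvNormA := rfl
  rw [hnn]
  set ks := dominos.map pvNormA with hks
  set sks := PySem.List.sorted2 ks (fun p => p.1) (fun p => p.2) with hsks
  have hperm : sks.Perm ks := PySem.List.sorted2_perm ks _ _ false
  rw [count_similar_dominos_eq_countP,
      pv_runScan_eq sks.length sks le_rfl (pv_sorted2_pairwise ks),
      pvMulti_perm hperm]
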